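-- pv_equiv track=rewrite | github.com/kajyuuen/Graph-based-semi-supervised-learning-CRF | src/features.py | ngramlist_and_sents2cr
-- ===== SOURCE A (Python) =====
-- from collections import Counter, defaultdict
-- import copy
--
-- def ngramlist_and_sents2cr(ngram_list, postags, marginal_prob_type):
--     cr = {}
--     ngram_type_counter = Counter()
--     for ngram, pos_tag in zip(ngram_list, postags):
--         ngram_type_counter[pos_tag] += 1
--         if ngram not in cr:
--             cr[ngram] = copy.deepcopy(marginal_prob_type)
--         cr[ngram][pos_tag] += 1
--     return cr, ngram_type_counter
-- ===== SOURCE B (Python) =====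
-- from collections import Counter, defaultdict
-- import copy
--
-- def ngramlist_and_sents2cr(ngram_list, postags, marginal_prob_type):
--     pairs = list(zip(ngram_list, postags))
--     ngram_type_counter = Counter(tag for _, tag in pairs)
--     grouped = defaultdict(Counter)
--     for ngram, tag in pairs:
--         grouped[ngram][tag] += 1
--     cr = {}
--     for ngram, counts in grouped.items():
--         dist = copy.deepcopy(marginal_prob_type)
--         for tag, c in counts.items():
--             dist[tag] += c
--         cr[ngram] = dist
--     return cr, ngram_type_counter
-- ===== Notes on version B (the rewrite author's own statement) =====
-- stated objective: alternative
-- what changed: A interleaves everything in one loop (counter bump, per-ngram template copy, single increment); B first groups tag counts per ngram with a defaultdict(Counter) and a Counter over the zipped tags, then in a second pass adds each group's totals into one copy of the template per unique ngram.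
import Mathlib
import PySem

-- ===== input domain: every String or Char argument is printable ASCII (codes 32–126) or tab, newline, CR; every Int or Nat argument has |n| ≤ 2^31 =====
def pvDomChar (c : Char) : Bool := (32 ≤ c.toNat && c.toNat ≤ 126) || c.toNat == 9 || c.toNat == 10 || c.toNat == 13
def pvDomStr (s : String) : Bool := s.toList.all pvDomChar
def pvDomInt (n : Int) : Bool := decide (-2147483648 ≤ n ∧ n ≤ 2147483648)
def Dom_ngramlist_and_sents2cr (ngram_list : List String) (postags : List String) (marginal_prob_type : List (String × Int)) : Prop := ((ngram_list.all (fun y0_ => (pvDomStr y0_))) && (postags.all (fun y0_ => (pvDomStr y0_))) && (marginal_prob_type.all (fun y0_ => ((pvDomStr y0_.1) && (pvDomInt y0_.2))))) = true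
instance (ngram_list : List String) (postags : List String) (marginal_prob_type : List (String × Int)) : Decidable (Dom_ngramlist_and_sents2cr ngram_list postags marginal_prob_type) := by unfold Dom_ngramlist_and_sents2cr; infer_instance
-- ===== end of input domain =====

-- B builds the result in two passes (group tag counts per ngram, then add each group into one copy of the
-- template) instead of A's single interleaved loop; objective: a simpler/alternative decomposition, same cost.

-- ===== PORT A =====
-- one iteration of A's loop body: counter bump, template copy on first sight of the ngram, then cr[ngram][pos_tag] += 1
-- (on every admitted input the tag is a key of the template — Pre_ excludes the KeyError case)
def aStep (mptD : PySem.Dict String Int)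
    (st : PySem.Dict String (PySem.Dict String Int) × PySem.Dict String Int)
    (p : String × String) :
    PySem.Dict String (PySem.Dict String Int) × PySem.Dict String Int :=
  let cnt := st.2.modify p.2 0 (· + 1)
  let cr0 := if st.1.contains p.1 then st.1 else st.1.insert p.1 mptD
  (cr0.modify p.1 PySem.Dict.empty (fun d => d.modify p.2 0 (· + 1)), cnt)

def ngramlist_and_sents2cr (ngram_list : List String) (postags : List String) (marginal_prob_type : List (String × Int)) : (List (String × List (String × Int))) × (List (String × Int)) :=
  let mptD := PySem.Dict.ofList marginal_prob_type
  let st := (ngram_list.zip postags).foldl (aStep mptD) (PySem.Dict.empty, PySem.Dict.empty)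
  (st.1.items.map (fun q => (q.1, q.2.items)), st.2.items)

-- ===== PORT B =====
-- dist = deepcopy(marginal_prob_type); for tag, c in counts.items(): dist[tag] += c
def bDist (mptD : PySem.Dict String Int) (counts : List (String × Int)) : PySem.Dict String Int :=
  counts.foldl (fun d q => d.modify q.1 0 (· + q.2)) mptD

def ngramlist_and_sents2cr_alt (ngram_list : List String) (postags : List String) (marginal_prob_type : List (String × Int)) : (List (String × List (String × Int))) × (List (String × Int)) :=
  let pairs := ngram_list.zip postags
  let tagC := PySem.Dict.counter (pairs.map (fun p => p.2))
  let grouped := pairs.foldl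
    (fun g p => g.modify p.1 PySem.Dict.empty (fun c => c.modify p.2 0 (· + 1))) PySem.Dict.empty
  let mptD := PySem.Dict.ofList marginal_prob_type
  let cr := grouped.items.foldl (fun cr q => cr.insert q.1 (bDist mptD q.2.items)) PySem.Dict.empty
  (cr.items.map (fun q => (q.1, q.2.items)), tagC.items)

-- ===== PRECONDITION & SPEC =====
-- Pre_ excludes exactly the inputs on which Python A raises KeyError: a zipped pos_tag that is not a key of the
-- marginal_prob_type dict (B raises the same KeyError on the same inputs).
def Pre_ngramlist_and_sents2cr (ngram_list : List String) (postags : List String) (marginal_prob_type : List (String × Int)) : Prop :=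
  ((ngram_list.zip postags).all (fun p => (marginal_prob_type.map Prod.fst).contains p.2)) = true
instance (ngram_list : List String) (postags : List String) (marginal_prob_type : List (String × Int)) : Decidable (Pre_ngramlist_and_sents2cr ngram_list postags marginal_prob_type) := by unfold Pre_ngramlist_and_sents2cr; infer_instance

def pvWitness_ngramlist_and_sents2cr : List String × List String × (List (String × Int)) :=
  (["ab", "ab", "cd"], ["N", "V", "N"], [("N", 0), ("V", 0)])

def Spec_ngramlist_and_sents2cr (ngram_list : List String) (postags : List String) (marginal_prob_type : List (String × Int)) (out : (List (String × List (String × Int))) × (List (String × Int))) : Prop := out = ngramlist_and_sents2cr_alt ngram_list postags marginal_prob_type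
instance (ngram_list : List String) (postags : List String) (marginal_prob_type : List (String × Int)) (out : (List (String × List (String × Int))) × (List (String × Int))) : Decidable (Spec_ngramlist_and_sents2cr ngram_list postags marginal_prob_type out) := by unfold Spec_ngramlist_and_sents2cr; infer_instance

-- ===== CLAIM (what is proved, stated in full; the proofs are below) =====
def Claim_equal_ngramlist_and_sents2cr : Prop := ∀ (ngram_list : List String) (postags : List String) (marginal_prob_type : List (String × Int)), Dom_ngramlist_and_sents2cr ngram_list postags marginal_prob_type → Pre_ngramlist_and_sents2cr ngram_list postags marginal_prob_type → Spec_ngramlist_and_sents2cr ngram_list postags marginal_prob_type (ngramlist_and_sents2cr ngram_list postags marginal_prob_type)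

-- ===== LEMMAS AND PROOFS =====

-- the tags occurring with ngram k, in order
def pvTagsOf (k : String) (ps : List (String × String)) : List String :=
  (ps.filter (fun p => p.1 == k)).map (fun p => p.2)

-- A's "insert the template if absent, then modify" is one modify with the template as default
lemma ifInsert_modify (c : PySem.Dict String (PySem.Dict String Int)) (k : String)
    (mptD : PySem.Dict String Int) (g : PySem.Dict String Int → PySem.Dict String Int) :
    (if c.contains k then c else c.insert k mptD).modify k PySem.Dict.empty g = c.modify k mptD g := by
  by_cases h : c.contains k = true
  · rcases h' : c.get? k with _ | v
    · rw [PySem.Dict.get?_eq_none_iff_contains] at h'; simp [h] at h'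
    · simp [h, PySem.Dict.modify, PySem.Dict.getD_of_get?_eq_some _ _ h']
  · simp only [Bool.not_eq_true] at h
    simp [h, PySem.Dict.modify, PySem.Dict.getD_insert_self, PySem.Dict.insert_insert_self,
      PySem.Dict.getD_of_not_contains _ _ h]

-- split A's product fold into its two independent component folds
lemma aStep_split (mptD : PySem.Dict String Int) (ps : List (String × String))
    (cr : PySem.Dict String (PySem.Dict String Int)) (cnt : PySem.Dict String Int) :
    ps.foldl (aStep mptD) (cr, cnt)
    = (ps.foldl (fun c p => c.modify p.1 mptD (fun d => d.modify p.2 0 (· + 1))) cr,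
       ps.foldl (fun d p => d.modify p.2 0 (· + 1)) cnt) := by
  induction ps generalizing cr cnt with
  | nil => rfl
  | cons p rest ih =>
    simp only [List.foldl_cons, aStep, ih, ifInsert_modify]

-- value at one key of a grouping fold = the fold over just that key's tags
lemma getD_foldl_group (ps : List (String × String)) (D0 : PySem.Dict String Int)
    (d : PySem.Dict String (PySem.Dict String Int)) (k : String) :
    (ps.foldl (fun g p => g.modify p.1 D0 (fun x => x.modify p.2 0 (· + 1))) d).getD k D0
    = (pvTagsOf k ps).foldl (fun x t => x.modify t 0 (· + 1)) (d.getD k D0) := by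
  induction ps generalizing d with
  | nil => rfl
  | cons p rest ih =>
    simp only [List.foldl_cons, ih, pvTagsOf, List.filter_cons]
    by_cases hp : p.1 = k
    · simp [hp]
    · have h2 : ¬ k = p.1 := fun h => hp h.symm
      simp [hp, beq_iff_eq, PySem.Dict.getD_modify, h2]

lemma getD_bDist (mptD : PySem.Dict String Int) (l : List (String × Int)) (t : String) :
    (bDist mptD l).getD t 0
    = mptD.getD t 0 + ((l.filter (fun q => q.1 == t)).map (fun q => q.2)).sum := by
  unfold bDist
  induction l generalizing mptD with
  | nil => simp
  | cons q rest ih =>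
    simp only [List.foldl_cons, ih, PySem.Dict.getD_modify, List.filter_cons]
    by_cases hq : q.1 = t
    · simp [hq]; ring
    · have h2 : ¬ t = q.1 := fun h => hq h.symm
      simp [beq_iff_eq, fun h => hq h, h2]

lemma filter_beq_of_nodup (s : List String) (t : String) (h : s.Nodup) :
    s.filter (fun c => c == t) = if t ∈ s then [t] else [] := by
  induction s with
  | nil => simp
  | cons a rest ih =>
    simp only [List.nodup_cons] at h
    by_cases ha : a = t
    · subst ha; simp [ih h.2, h.1]
    · have h2 : ¬ t = a := fun h => ha h.symm
      simp [ha, ih h.2, beq_iff_eq, h2]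

lemma keys_ofList' (mpt : List (String × Int)) :
    (PySem.Dict.ofList mpt).keys = PySem.Set.ofList (mpt.map Prod.fst) := by
  show ((List.foldl (fun acc p => acc.insert p.1 p.2) PySem.Dict.empty mpt).keys) = _
  rw [PySem.Dict.keys_foldl_insert_key mpt Prod.fst (fun _ p => p.2)]
  simp [PySem.Set.update_nil_left]

-- a Set.update by elements already present changes nothing
lemma update_of_subset (s : PySem.Set String) (xs : List String) (h : ∀ x ∈ xs, x ∈ s) :
    s.update xs = s := by
  rw [PySem.Set.update_eq_append_filter]
  have hnil : (PySem.Set.ofList xs).filter (fun y => !s.contains y) = [] := by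
    rw [List.filter_eq_nil_iff]
    intro y hy
    have hm := h y ((PySem.Set.mem_ofList xs y).mp hy)
    simp [PySem.Set.contains, hm]
  rw [hnil, List.append_nil]

-- adding a tag multiset into the template one by one = adding its counter's totals in one pass
lemma inner_eq (mptD : PySem.Dict String Int) (tags : List String)
    (hnd : mptD.keys.Nodup) (h : ∀ t ∈ tags, t ∈ mptD.keys) :
    tags.foldl (fun x t => x.modify t 0 (· + 1)) mptD
    = bDist mptD (PySem.Dict.counter tags).items := by
  have kA : (tags.foldl (fun x t => x.modify t 0 (· + 1)) mptD).keys = mptD.keys := by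
    rw [PySem.Dict.keys_foldl_modify tags 0 (fun _ _ => (· + 1))]
    exact update_of_subset _ _ h
  have hmapfst : ((PySem.Dict.counter tags).items.map Prod.fst) = PySem.Set.ofList tags := by
    rw [PySem.Dict.items_counter, List.map_map]
    have hid : Prod.fst ∘ (fun k : String => ((k, (tags.count k : Int)) : String × Int)) = id := rfl
    rw [hid, List.map_id]
  have kB : (bDist mptD (PySem.Dict.counter tags).items).keys = mptD.keys := by
    unfold bDist
    rw [PySem.Dict.keys_foldl_modify_key _ Prod.fst 0 (fun _ q => (· + q.2)), hmapfst]
    exact update_of_subset _ _ (fun x hx => h x ((PySem.Set.mem_ofList tags x).mp hx))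
  apply PySem.Dict.ext
  rw [PySem.Dict.items_eq_map_keys _ (kA ▸ hnd) 0, PySem.Dict.items_eq_map_keys _ (kB ▸ hnd) 0, kA, kB]
  apply List.map_congr_left
  intro t _
  rw [PySem.Dict.getD_foldl_modify_add_one, getD_bDist, PySem.Dict.items_counter,
    List.filter_map, List.map_map]
  by_cases ht : t ∈ tags
  · have : (fun (q : String × Int) => q.1 == t) ∘ (fun k => ((k, (tags.count k : Int)) : String × Int))
        = fun c => c == t := rfl
    rw [this, filter_beq_of_nodup _ _ (PySem.Set.nodup_ofList tags)]
    simp [(PySem.Set.mem_ofList tags t).mpr ht]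
  · have hc : tags.count t = 0 := List.count_eq_zero.mpr ht
    have : (fun (q : String × Int) => q.1 == t) ∘ (fun k => ((k, (tags.count k : Int)) : String × Int))
        = fun c => c == t := rfl
    rw [this, filter_beq_of_nodup _ _ (PySem.Set.nodup_ofList tags)]
    have : t ∉ PySem.Set.ofList tags := fun hm => ht ((PySem.Set.mem_ofList tags t).mp hm)
    simp [this, hc]

-- ===== VERDICT (by name: the statement is the Claim_ definition above) =====
theorem ngramlist_and_sents2cr_spec : Claim_equal_ngramlist_and_sents2cr := by
  intro ngl pts mpt _hdom hpre
  unfold Spec_ngramlist_and_sents2cr ngramlist_and_sents2cr ngramlist_and_sents2cr_alt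
  simp only []
  set ps := ngl.zip pts with hps
  set mptD := PySem.Dict.ofList mpt with hmptD
  have hnd : mptD.keys.Nodup := PySem.Dict.nodup_keys_ofList mpt
  have hpre' : ∀ t ∈ ps.map (fun p => p.2), t ∈ mptD.keys := by
    rw [hmptD, keys_ofList']
    unfold Pre_ngramlist_and_sents2cr at hpre
    simp only [List.all_eq_true] at hpre
    intro t ht
    rcases List.mem_map.mp ht with ⟨p, hp, rfl⟩
    have := hpre p hp
    rw [PySem.Set.mem_ofList]
    simpa using this
  have htags : ∀ k, ∀ t ∈ pvTagsOf k ps, t ∈ mptD.keys := by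
    intro k t ht
    rcases List.mem_map.mp ht with ⟨p, hp, rfl⟩
    exact hpre' _ (List.mem_map.mpr ⟨p, List.mem_of_mem_filter hp, rfl⟩)
  rw [aStep_split]
  set K := PySem.Set.ofList (ps.map Prod.fst) with hK
  have hKnd : K.Nodup := PySem.Set.nodup_ofList _
  have hKA : (ps.foldl (fun c p => c.modify p.1 mptD (fun d => d.modify p.2 0 (· + 1)))
      PySem.Dict.empty).keys = K := by
    rw [PySem.Dict.keys_foldl_modify_key ps Prod.fst mptD
      (fun _ p => fun d => d.modify p.2 0 (· + 1))]
    simp [PySem.Set.update_nil_left, hK]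
  have hKG : (ps.foldl (fun g p => g.modify p.1 PySem.Dict.empty (fun c => c.modify p.2 0 (· + 1)))
      (PySem.Dict.empty : PySem.Dict String (PySem.Dict String Int))).keys = K := by
    rw [PySem.Dict.keys_foldl_modify_key ps Prod.fst PySem.Dict.empty
      (fun _ p => fun c => c.modify p.2 0 (· + 1))]
    simp [PySem.Set.update_nil_left, hK]
  rw [Prod.mk.injEq]
  refine ⟨?_, ?_⟩
  · -- cr component
    set grouped := ps.foldl
      (fun g p => g.modify p.1 PySem.Dict.empty (fun c => c.modify p.2 0 (· + 1)))
      (PySem.Dict.empty : PySem.Dict String (PySem.Dict String Int)) with hg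
    have hBitems : (grouped.items.foldl (fun cr q => cr.insert q.1 (bDist mptD q.2.items))
        PySem.Dict.empty).items = grouped.items.map (fun q => (q.1, bDist mptD q.2.items)) := by
      rw [PySem.Dict.items_foldl_insert_fresh grouped.items Prod.fst
        (fun q => bDist mptD q.2.items) PySem.Dict.empty
        (fun a _ => PySem.Dict.contains_empty a.1)
        (by rw [show grouped.items.map Prod.fst = grouped.keys from rfl, hKG]; exact hKnd)]
      simp [PySem.Dict.empty]
    simp only [hBitems]
    rw [PySem.Dict.items_eq_map_keys _ (hKA ▸ hKnd) mptD, hKA,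
        PySem.Dict.items_eq_map_keys grouped (hKG ▸ hKnd) PySem.Dict.empty, hKG]
    simp only [List.map_map]
    apply List.map_congr_left
    intro k _
    simp only [Function.comp]
    congr 1
    rw [getD_foldl_group, getD_foldl_group]
    rw [PySem.Dict.getD_empty, PySem.Dict.getD_empty]
    exact congrArg PySem.Dict.items (inner_eq mptD (pvTagsOf k ps) hnd (htags k))
  · -- counter component
    congr 1
    rw [PySem.Dict.counter_eq_foldl, List.foldl_map]
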